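-- pv_equiv track=rewrite | github.com/danielsturm/honeybee_cell_segmentation_pipeline | annotator/cell_finder/hex_graph_builder.py | _merge_predcitions_and_check_conflict
-- ===== SOURCE A (Python) =====
-- def _merge_predcitions_and_check_conflict(group):
--     seen = set()
--     conflict = False
--     all_support = []
--     for _, support in group:
--         for s in support:
--             pair = (s["source"], s["dir"])
--             if pair in seen:
--                 conflict = True
--             else:
--                 seen.add(pair)
--             all_support.append(s)
--     return conflict, all_support
-- ===== SOURCE B (Python) =====
-- def _merge_predcitions_and_check_conflict(group):
--     all_support = [s for _, support in group for s in support]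
--     pairs = sorted((s["source"], s["dir"]) for s in all_support)
--     conflict = any(a == b for a, b in zip(pairs, pairs[1:]))
--     return conflict, all_support
-- ===== Notes on version B (the rewrite author's own statement) =====
-- stated objective: alternative
-- what changed: Replaced the single-pass hash-set duplicate detection (incremental seen-set, per-element membership branch, mutable conflict flag) by a sort-based one: flatten, sort the (source, dir) key pairs, and report a conflict iff two adjacent sorted pairs are equal.
import Mathlib
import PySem

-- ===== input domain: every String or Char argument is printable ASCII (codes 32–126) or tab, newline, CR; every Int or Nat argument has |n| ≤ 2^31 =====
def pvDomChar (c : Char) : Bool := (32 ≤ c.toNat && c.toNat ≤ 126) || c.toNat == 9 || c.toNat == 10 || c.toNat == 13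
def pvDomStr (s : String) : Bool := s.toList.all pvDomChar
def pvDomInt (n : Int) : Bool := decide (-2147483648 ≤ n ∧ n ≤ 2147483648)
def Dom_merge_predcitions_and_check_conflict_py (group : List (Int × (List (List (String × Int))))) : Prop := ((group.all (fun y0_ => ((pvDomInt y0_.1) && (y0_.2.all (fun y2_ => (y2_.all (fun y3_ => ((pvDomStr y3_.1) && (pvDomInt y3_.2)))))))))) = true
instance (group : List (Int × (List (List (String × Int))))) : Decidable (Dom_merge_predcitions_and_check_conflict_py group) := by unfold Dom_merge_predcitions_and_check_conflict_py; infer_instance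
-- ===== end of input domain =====

-- B replaces A's single-pass hash-set duplicate detection by a different algorithm:
-- flatten, SORT the (source, dir) pairs, and report a conflict iff two adjacent sorted pairs are equal.

-- shared helper: the dict lookups s["source"], s["dir"] (assoc list, first match)
def pvPair (s : List (String × Int)) : Int × Int :=
  ((((s.find? (fun p => p.1 == "source")).map (·.2)).getD 0),
   (((s.find? (fun p => p.1 == "dir")).map (·.2)).getD 0))

-- ===== PORT A =====
-- A's loop body: compute the pair, test/extend the seen-set, set the flag, append s.
def pvStepA (st : PySem.Set (Int × Int) × Bool × List (List (String × Int)))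
    (s : List (String × Int)) : PySem.Set (Int × Int) × Bool × List (List (String × Int)) :=
  let pair := pvPair s
  if PySem.Set.contains st.1 pair then (st.1, true, st.2.2 ++ [s])
  else (PySem.Set.add st.1 pair, st.2.1, st.2.2 ++ [s])

def merge_predcitions_and_check_conflict_py (group : List (Int × (List (List (String × Int))))) : Bool × (List (List (String × Int))) :=
  let st := group.foldl (fun st g => g.2.foldl pvStepA st) (PySem.Set.empty, false, [])
  (st.2.1, st.2.2)

-- ===== PORT B =====
-- pairs[1:] is the slice from the literal nonnegative index 1, i.e. drop 1 (PySem.List.slice_from)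
def merge_predcitions_and_check_conflict_py_alt (group : List (Int × (List (List (String × Int))))) : Bool × (List (List (String × Int))) :=
  let all_support := group.flatMap (fun g => g.2)
  let pairs := PySem.List.sorted2 (all_support.map pvPair) (fun p => p.1) (fun p => p.2)
  ((pairs.zip (pairs.drop 1)).any (fun ab => ab.1 == ab.2), all_support)

-- ===== PRECONDITION & SPEC =====
-- Pre_ excludes exactly the inputs on which A raises KeyError: some support dict lacks "source" or "dir".
def Pre_merge_predcitions_and_check_conflict_py (group : List (Int × (List (List (String × Int))))) : Prop :=
  group.all (fun g => g.2.all (fun s => s.any (fun p => p.1 == "source") && s.any (fun p => p.1 == "dir"))) = true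
instance (group : List (Int × (List (List (String × Int))))) : Decidable (Pre_merge_predcitions_and_check_conflict_py group) := by unfold Pre_merge_predcitions_and_check_conflict_py; infer_instance

def pvWitness_merge_predcitions_and_check_conflict_py : (List (Int × (List (List (String × Int))))) :=
  [(0, [[("source", 1), ("dir", 2)], [("source", 1), ("dir", 3)]]), (1, [[("source", 1), ("dir", 2)]])]

def Spec_merge_predcitions_and_check_conflict_py (group : List (Int × (List (List (String × Int))))) (out : Bool × (List (List (String × Int)))) : Prop := out = merge_predcitions_and_check_conflict_py_alt group
instance (group : List (Int × (List (List (String × Int))))) (out : Bool × (List (List (String × Int)))) : Decidable (Spec_merge_predcitions_and_check_conflict_py group out) := by unfold Spec_merge_predcitions_and_check_conflict_py; infer_instance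

-- ===== CLAIM =====
def Claim_equal_merge_predcitions_and_check_conflict_py : Prop := ∀ (group : List (Int × (List (List (String × Int))))), Dom_merge_predcitions_and_check_conflict_py group → Pre_merge_predcitions_and_check_conflict_py group → Spec_merge_predcitions_and_check_conflict_py group (merge_predcitions_and_check_conflict_py group)

-- ===== LEMMAS AND PROOFS =====

-- A's nested loops are one loop over the flattened list
theorem pvFoldA_flat (group : List (Int × (List (List (String × Int)))))
    (st : PySem.Set (Int × Int) × Bool × List (List (String × Int))) :
    group.foldl (fun st g => g.2.foldl pvStepA st) st
      = (group.flatMap (fun g => g.2)).foldl pvStepA st := by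
  induction group generalizing st with
  | nil => rfl
  | cons g gs ih => simp [List.flatMap_cons, List.foldl_append, ih]

-- A's loop over a flat list, characterised: the flag is "the pairs list (after seen) has a duplicate"
theorem pvFoldA_char (l : List (List (String × Int)))
    (seen : PySem.Set (Int × Int)) (c : Bool) (acc : List (List (String × Int)))
    (hs : seen.Nodup) :
    l.foldl pvStepA (seen, c, acc)
      = (PySem.Set.update seen (l.map pvPair),
         c || !decide ((seen ++ l.map pvPair).Nodup),
         acc ++ l) := by
  induction l generalizing seen c acc with
  | nil =>
      simp only [List.foldl_nil, PySem.Set.update, List.map_nil, List.append_nil, List.foldl_nil,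
        hs, decide_true, Bool.not_true, Bool.or_false]
  | cons s l ih =>
      by_cases hx : pvPair s ∈ seen
      · have hstep : pvStepA (seen, c, acc) s = (seen, true, acc ++ [s]) := by
          simp [pvStepA]
          intro h
          exact absurd hx h
        have hnd : ¬ (seen ++ (s :: l).map pvPair).Nodup := by
          intro h
          rcases (List.nodup_append.mp h) with ⟨_, _, hdisj⟩
          exact hdisj (pvPair s) hx (pvPair s) (by simp) rfl
        have hadd : PySem.Set.add seen (pvPair s) = seen := PySem.Set.add_of_mem hx
        calc (s :: l).foldl pvStepA (seen, c, acc)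
            = l.foldl pvStepA (seen, true, acc ++ [s]) := by rw [List.foldl_cons, hstep]
          _ = _ := by
              rw [ih seen true (acc ++ [s]) hs]
              refine Prod.ext ?_ (Prod.ext ?_ ?_)
              · show PySem.Set.update seen (l.map pvPair)
                  = PySem.Set.update seen ((s :: l).map pvPair)
                rw [List.map_cons,
                  show PySem.Set.update seen (pvPair s :: l.map pvPair)
                    = PySem.Set.update (PySem.Set.add seen (pvPair s)) (l.map pvPair) from rfl, hadd]
              · show true = (c || !decide ((seen ++ (s :: l).map pvPair).Nodup))
                have hnd' : ¬ (seen ++ pvPair s :: l.map pvPair).Nodup := by simpa using hnd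
                simp [hnd']
              · simp
      · have hadd : PySem.Set.add seen (pvPair s) = seen ++ [pvPair s] :=
          PySem.Set.add_of_not_mem hx
        have hstep : pvStepA (seen, c, acc) s = (seen ++ [pvPair s], c, acc ++ [s]) := by
          simp [pvStepA, hadd]
          exact hx
        have hs' : (seen ++ [pvPair s]).Nodup := by
          rw [List.nodup_append]
          refine ⟨hs, List.nodup_singleton _, ?_⟩
          intro a ha b hb
          simp only [List.mem_singleton] at hb
          subst hb
          exact fun h => hx (h ▸ ha)
        calc (s :: l).foldl pvStepA (seen, c, acc)
            = l.foldl pvStepA (seen ++ [pvPair s], c, acc ++ [s]) := by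
              rw [List.foldl_cons, hstep]
          _ = _ := by
              rw [ih _ c _ hs']
              refine Prod.ext ?_ (Prod.ext ?_ ?_)
              · show PySem.Set.update (seen ++ [pvPair s]) (l.map pvPair)
                  = PySem.Set.update seen ((s :: l).map pvPair)
                rw [List.map_cons,
                  show PySem.Set.update seen (pvPair s :: l.map pvPair)
                    = PySem.Set.update (PySem.Set.add seen (pvPair s)) (l.map pvPair) from rfl, hadd]
              · show (c || !decide ((seen ++ [pvPair s] ++ l.map pvPair).Nodup))
                  = (c || !decide ((seen ++ (s :: l).map pvPair).Nodup))
                rw [List.append_assoc, List.singleton_append, List.map_cons]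
              · simp

-- B side: the lexicographic strict comparison sorted2 uses on (Int × Int)
def pvLt (a b : Int × Int) : Bool :=
  decide (a.1 < b.1) || (!decide (b.1 < a.1) && decide (a.2 < b.2))

theorem pvLt_asymm {a b : Int × Int} (h : pvLt a b = true) : pvLt b a = false := by
  obtain ⟨a1, a2⟩ := a; obtain ⟨b1, b2⟩ := b
  simp [pvLt] at h ⊢; omega

theorem pvLt_trans {a b c : Int × Int} (h1 : pvLt a b = true) (h2 : pvLt b c = true) :
    pvLt a c = true := by
  obtain ⟨a1, a2⟩ := a; obtain ⟨b1, b2⟩ := b; obtain ⟨c1, c2⟩ := c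
  simp [pvLt] at h1 h2 ⊢; omega

theorem pvLt_connex {a b : Int × Int} (h1 : pvLt a b = false) (h2 : pvLt b a = false) : a = b := by
  obtain ⟨a1, a2⟩ := a; obtain ⟨b1, b2⟩ := b
  simp [pvLt] at h1 h2 ⊢
  omega

-- inserting into a pvLt-ordered list keeps it ordered
theorem pvInsert_pairwise (x : Int × Int) (ys : List (Int × Int))
    (h : ys.Pairwise (fun a b => pvLt b a = false)) :
    (PySem.List.insertBy (fun a b => pvLt a b) x ys).Pairwise (fun a b => pvLt b a = false) := by
  induction ys with
  | nil => simp [PySem.List.insertBy]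
  | cons y ys ih =>
      rw [show PySem.List.insertBy (fun a b => pvLt a b) x (y :: ys)
            = if pvLt x y then x :: y :: ys else y :: PySem.List.insertBy (fun a b => pvLt a b) x ys
          from rfl]
      rcases List.pairwise_cons.mp h with ⟨hy, hys⟩
      by_cases hxy : pvLt x y = true
      · rw [if_pos hxy]
        refine List.pairwise_cons.mpr ⟨?_, h⟩
        intro z hz
        rcases List.mem_cons.mp hz with rfl | hz
        · exact pvLt_asymm hxy
        · by_contra hc
          have hzx : pvLt z x = true := by
            cases hzx : pvLt z x with
            | false => exact absurd hzx hc
            | true => rfl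
          have := pvLt_trans hzx hxy
          rw [hy z hz] at this; exact Bool.false_ne_true this
      · rw [if_neg hxy]
        refine List.pairwise_cons.mpr ⟨?_, ih hys⟩
        intro z hz
        rcases (PySem.List.mem_insertBy _ x z ys).mp hz with rfl | hz
        · exact Bool.eq_false_iff.mpr hxy
        · exact hy z hz

-- the insertBy fold (= sorted2 with these keys) is pvLt-ordered
theorem pvSortFold_pairwise (xs : List (Int × Int)) (acc : List (Int × Int))
    (h : acc.Pairwise (fun a b => pvLt b a = false)) :
    (xs.foldl (fun acc x => PySem.List.insertBy (fun a b => pvLt a b) x acc) acc).Pairwise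
      (fun a b => pvLt b a = false) := by
  induction xs generalizing acc with
  | nil => exact h
  | cons x xs ih => exact ih _ (pvInsert_pairwise x acc h)

theorem pvSorted2_eq (xs : List (Int × Int)) :
    PySem.List.sorted2 xs (fun p => p.1) (fun p => p.2)
      = xs.foldl (fun acc x => PySem.List.insertBy (fun a b => pvLt a b) x acc) [] := rfl

-- on a pvLt-ordered list, "some adjacent pair is equal" decides ¬Nodup
theorem pvAdj_nodup (ys : List (Int × Int))
    (h : ys.Pairwise (fun a b => pvLt b a = false)) :
    ((ys.zip (ys.drop 1)).any (fun ab => ab.1 == ab.2)) = !decide ys.Nodup := by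
  induction ys with
  | nil => simp
  | cons x ys ih =>
      cases ys with
      | nil => simp
      | cons y t =>
          rcases List.pairwise_cons.mp h with ⟨hx, htail⟩
          have hzip : ((x :: y :: t).zip ((x :: y :: t).drop 1))
              = (x, y) :: ((y :: t).zip ((y :: t).drop 1)) := by
            simp [List.zip]
          rw [hzip, List.any_cons, ih htail]
          by_cases hxy : x = y
          · subst hxy
            have : ¬ (x :: x :: t).Nodup := by simp
            simp [this]
          · have hxt : x ∉ y :: t := by
              intro hmem
              rcases List.mem_cons.mp hmem with rfl | hmem
              · exact hxy rfl
              · -- x occurs later in t: then ¬ pvLt y x (from hx) and ¬ pvLt x y (from htail) force x = y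
                have h1 : pvLt y x = false := hx y (by simp)
                have h2 : pvLt x y = false :=
                  (List.pairwise_cons.mp htail).1 x hmem
                exact hxy (pvLt_connex h2 h1)
            have hne : (x == y) = false := by simp [hxy]
            have : (x :: y :: t).Nodup ↔ (y :: t).Nodup := by
              constructor
              · exact fun hh => hh.of_cons
              · exact fun hh => List.nodup_cons.mpr ⟨hxt, hh⟩
            rw [hne]
            by_cases hnd : (y :: t).Nodup
            · simp [hnd, this.mpr hnd]
            · have hnd2 : ¬ (x :: y :: t).Nodup := fun hh => hnd (this.mp hh)
              simp [hnd, hnd2]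

theorem pvSorted2_pairwise (xs : List (Int × Int)) :
    (PySem.List.sorted2 xs (fun p => p.1) (fun p => p.2)).Pairwise
      (fun a b => pvLt b a = false) := by
  rw [pvSorted2_eq]
  exact pvSortFold_pairwise xs [] (by simp)

-- ===== VERDICT =====
theorem merge_predcitions_and_check_conflict_py_spec : Claim_equal_merge_predcitions_and_check_conflict_py := by
  intro group _ _
  unfold Spec_merge_predcitions_and_check_conflict_py
  show merge_predcitions_and_check_conflict_py group = merge_predcitions_and_check_conflict_py_alt group
  unfold merge_predcitions_and_check_conflict_py merge_predcitions_and_check_conflict_py_alt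
  rw [pvFoldA_flat]
  rw [pvFoldA_char (group.flatMap (fun g => g.2)) PySem.Set.empty false [] (by
    show ([] : List (Int × Int)).Nodup
    exact List.nodup_nil)]
  simp only [List.nil_append, Bool.false_or]
  set pairs := (group.flatMap (fun g => g.2)).map pvPair with hp
  have hsorted := pvSorted2_pairwise pairs
  have hperm := PySem.List.sorted2_perm pairs (fun p => p.1) (fun p => p.2) false
  have hadj := pvAdj_nodup _ hsorted
  have hnodup : (PySem.List.sorted2 pairs (fun p => p.1) (fun p => p.2)).Nodup ↔ pairs.Nodup :=
    hperm.nodup_iff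
  refine Prod.ext ?_ rfl
  show (!decide (((PySem.Set.empty : PySem.Set (Int × Int)) ++ pairs).Nodup))
      = ((PySem.List.sorted2 pairs (fun p => p.1) (fun p => p.2)).zip
          ((PySem.List.sorted2 pairs (fun p => p.1) (fun p => p.2)).drop 1)).any
          (fun ab => ab.1 == ab.2)
  rw [show (PySem.Set.empty : PySem.Set (Int × Int)) ++ pairs = pairs from List.nil_append _]
  rw [hadj]
  by_cases h : pairs.Nodup
  · simp [h, hnodup.mpr h]
  · have : ¬ (PySem.List.sorted2 pairs (fun p => p.1) (fun p => p.2)).Nodup :=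
      fun hh => h (hnodup.mp hh)
    simp [h, this]
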